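-- pv_equiv track=rewrite | github.com/rangasashank/concordance | a2/concord2.py | smallest_word
-- ===== SOURCE A (Python) =====
-- def smallest_word(exclusion_list, indexing_list):
--
--     smallest_word = "zzz"
--     word = ""
--     for i in indexing_list:
--         word_list = i.split(" ")
--         k = 0
--         while k < len(word_list):
--             if len(exclusion_list)== 0:
--                 word = word_list[k]
--             else:
--                 for j in exclusion_list:
--                     if j != word_list[k].lower():
--                         word = word_list[k]
--                     else:
--                         word = ""
--                         break
--             if word!="" and ((word.lower())<(smallest_word.lower())) and (word not in exclusion_list):
--                 smallest_word = word
--             k+=1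
--
--     if smallest_word == "zzz":
--         smallest_word = ""
--         return smallest_word
--     else:
--         return smallest_word
-- ===== SOURCE B (Python) =====
-- def smallest_word(exclusion_list, indexing_list):
--     excl = set(exclusion_list)
--     candidates = [w for line in indexing_list for w in line.split(" ")
--                   if w != "" and w.lower() not in excl and w not in excl]
--     ordered = sorted(candidates, key=str.lower)
--     return ordered[0] if ordered else ""
-- ===== Notes on version B (the rewrite author's own statement) =====
-- stated objective: faster
-- what changed: Replaces A's per-word linear scans of exclusion_list and its running min against a 'zzz' sentinel by: flatten all words, filter them with O(1) lookups in a set built once from exclusion_list, stably sort the candidates by lowercase and take the first; B also drops the accidental 'zzz' cutoff (see differs).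
-- intended difference: On inputs whose non-excluded words all have lowercase form >= 'zzz' (e.g. 'zzzz', '~x'), A returns '' because its 'zzz' sentinel can never be beaten, while B returns the genuinely smallest word, which is what 'find the smallest non-excluded word' intends. — e.g. on smallest_word([], ["zzzz"]): A returns "", B returns "zzzz"
import Mathlib
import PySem

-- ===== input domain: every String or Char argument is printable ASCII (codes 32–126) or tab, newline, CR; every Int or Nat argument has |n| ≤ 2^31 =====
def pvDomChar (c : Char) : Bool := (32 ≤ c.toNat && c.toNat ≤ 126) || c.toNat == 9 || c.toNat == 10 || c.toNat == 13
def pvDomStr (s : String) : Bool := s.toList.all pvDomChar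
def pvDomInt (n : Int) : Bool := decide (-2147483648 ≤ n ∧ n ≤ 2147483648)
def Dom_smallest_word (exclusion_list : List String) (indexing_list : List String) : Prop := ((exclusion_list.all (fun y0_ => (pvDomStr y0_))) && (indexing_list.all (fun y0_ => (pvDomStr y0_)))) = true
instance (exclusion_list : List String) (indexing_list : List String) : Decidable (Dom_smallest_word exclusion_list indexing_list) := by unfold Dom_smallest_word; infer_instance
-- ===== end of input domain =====

-- B flattens the words, filters them against a set of the exclusions, stably sorts by the
-- lowercased word and takes the first element; it drops A's accidental "zzz" sentinel cutoff
-- (see D_smallest_word below). Neither implementation mutates its arguments.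

-- ===== PORT A =====
-- i.split(" ") — the word list both Pythons build from a line (also read by D_ below)
def pvSplitA (line : String) : List String := (PySem.Str.split? line " ").getD []

-- the inner 'for j in exclusion_list: …' loop of A; returns the value of the variable 'word'
-- after the loop ('break' = the "" branch)
def pvInnerJ (w : String) (word : String) : List String → String
  | [] => word
  | j :: rest => if j ≠ PySem.Str.lower w then pvInnerJ w w rest else ""

-- one iteration of A's 'while k < len(word_list)' body on the state (smallest_word, word)
def pvStepA (exclusion_list : List String) (st : String × String) (wk : String) : String × String :=
  let word := if exclusion_list.length = 0 then wk else pvInnerJ wk st.2 exclusion_list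
  -- Python's 's < t' on str is code-point lexicographic = '<' on s.toList (PYSEM str COMPARISON)
  let sw := if word ≠ "" ∧ (PySem.Str.lower word).toList < (PySem.Str.lower st.1).toList ∧ word ∉ exclusion_list
            then word else st.1
  (sw, word)

def smallest_word (exclusion_list : List String) (indexing_list : List String) : String :=
  let st := indexing_list.foldl
    (fun st i => (pvSplitA i).foldl (pvStepA exclusion_list) st)
    ("zzz", "")
  if st.1 = "zzz" then "" else st.1

-- ===== PORT B =====
def smallest_word_alt (exclusion_list : List String) (indexing_list : List String) : String :=
  let excl := PySem.Set.ofList exclusion_list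
  let candidates := indexing_list.flatMap (fun line =>
    (pvSplitA line).filter (fun w =>
      w ≠ "" && !(PySem.Set.contains excl (PySem.Str.lower w)) && !(PySem.Set.contains excl w)))
  -- sorted(key=str.lower): Python's str order is code-point lexicographic = '<' on toList
  let ordered := PySem.List.sorted candidates (fun w => (PySem.Str.lower w).toList) false
  match ordered with
  | [] => ""
  | x :: _ => x

-- ===== PRECONDITION & SPEC =====
-- On inputs where some non-excluded word exists but every non-excluded word's lowercase form is
-- ≥ "zzz", A returns "" (its "zzz" sentinel is never beaten), while B returns the genuinely
-- smallest such word, which is what 'find the smallest non-excluded word' intends.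
def D_smallest_word (exclusion_list : List String) (indexing_list : List String) : Prop :=
  let ws := (indexing_list.flatMap pvSplitA).filter fun w =>
    w ≠ "" && PySem.Str.lower w ∉ exclusion_list && w ∉ exclusion_list
  ws ≠ [] ∧ ∀ w ∈ ws, ¬ (PySem.Str.lower w).toList < "zzz".toList
instance (exclusion_list : List String) (indexing_list : List String) :
    Decidable (D_smallest_word exclusion_list indexing_list) := by
  unfold D_smallest_word; infer_instance

def Spec_smallest_word (exclusion_list : List String) (indexing_list : List String) (out : String) : Prop := ¬ D_smallest_word exclusion_list indexing_list → out = smallest_word_alt exclusion_list indexing_list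
instance (exclusion_list : List String) (indexing_list : List String) (out : String) : Decidable (Spec_smallest_word exclusion_list indexing_list out) := by unfold Spec_smallest_word; infer_instance

def pvDiffWitness_smallest_word : List String × List String := ([], ["zzzz"])
def pvDiffWitnessOut_smallest_word : String × String := ("", "zzzz")

-- ===== CLAIM (what is proved, stated in full; the proofs are below) =====
def Claim_unchanged_smallest_word : Prop := ∀ (exclusion_list : List String) (indexing_list : List String), Dom_smallest_word exclusion_list indexing_list → Spec_smallest_word exclusion_list indexing_list (smallest_word exclusion_list indexing_list)
def Claim_changed_smallest_word : Prop := Dom_smallest_word (pvDiffWitness_smallest_word.1) (pvDiffWitness_smallest_word.2) ∧ D_smallest_word (pvDiffWitness_smallest_word.1) (pvDiffWitness_smallest_word.2) ∧ smallest_word (pvDiffWitness_smallest_word.1) (pvDiffWitness_smallest_word.2) = pvDiffWitnessOut_smallest_word.1 ∧ smallest_word_alt (pvDiffWitness_smallest_word.1) (pvDiffWitness_smallest_word.2) = pvDiffWitnessOut_smallest_word.2 ∧ pvDiffWitnessOut_smallest_word.1 ≠ pvDiffWitnessOut_smallest_word.2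
def Claim_exact_smallest_word : Prop := ∀ (exclusion_list : List String) (indexing_list : List String), Dom_smallest_word exclusion_list indexing_list → D_smallest_word exclusion_list indexing_list → smallest_word exclusion_list indexing_list ≠ smallest_word_alt exclusion_list indexing_list

-- ===== LEMMAS AND PROOFS =====

-- proof-side names for the word list and candidate test D_ is phrased over
def pvWords (indexing_list : List String) : List String :=
  indexing_list.flatMap pvSplitA
def pvCand (exclusion_list : List String) (w : String) : Bool :=
  w ≠ "" && PySem.Str.lower w ∉ exclusion_list && w ∉ exclusion_list

lemma pvD_iff (excl ind : List String) :
    D_smallest_word excl ind ↔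
      ((pvWords ind).filter (fun w => pvCand excl w) ≠ [] ∧
       ∀ w ∈ (pvWords ind).filter (fun w => pvCand excl w),
         ¬ (PySem.Str.lower w).toList < "zzz".toList) := Iff.rfl

-- proof-side abbreviations: the lowercase sort key and the bare running-min step
def pvKey (w : String) : List Char := (PySem.Str.lower w).toList
def pvBare (s w : String) : String := if pvKey w < pvKey s then w else s
def pvMinStep (excl : List String) (s w : String) : String :=
  if pvCand excl w = true ∧ pvKey w < pvKey s then w else s

lemma pvCand_iff (excl : List String) (w : String) :
    pvCand excl w = true ↔ w ≠ "" ∧ PySem.Str.lower w ∉ excl ∧ w ∉ excl := by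
  simp [pvCand, and_assoc]

lemma pvKey_zzz : pvKey "zzz" = "zzz".toList := by decide

-- A's inner for-j loop on a nonempty exclusion list: "" iff the lowercased word is excluded
lemma pvInnerJ_ne_nil (w : String) : ∀ (l : List String), l ≠ [] → ∀ wd,
    pvInnerJ w wd l = if PySem.Str.lower w ∈ l then "" else w := by
  intro l
  induction l with
  | nil => intro h; exact absurd rfl h
  | cons j rest ih =>
    intro _ wd
    by_cases h : j = PySem.Str.lower w
    · simp [pvInnerJ, h]
    · have h' : ¬ PySem.Str.lower w = j := fun e => h e.symm
      cases rest with
      | nil => simp [pvInnerJ, h, h']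
      | cons j' rest' =>
        rw [show pvInnerJ w wd (j :: j' :: rest') =
              if j ≠ PySem.Str.lower w then pvInnerJ w w (j' :: rest') else "" from rfl]
        rw [if_pos h, ih (by simp) w]
        simp [List.mem_cons, h']

-- the first component of one iteration of A's while-body is the guarded min step
lemma pvStepA_fst (excl : List String) (st : String × String) (wk : String) :
    (pvStepA excl st wk).1 = pvMinStep excl st.1 wk := by
  cases excl with
  | nil =>
    simp only [pvStepA, pvMinStep, pvCand_iff, pvKey, List.length_nil, List.not_mem_nil]
    split_ifs <;> first | rfl | tauto
  | cons j rest =>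
    have hw := pvInnerJ_ne_nil wk (j :: rest) (by simp) st.2
    simp only [pvStepA, List.length_cons, pvMinStep, pvCand_iff, pvKey, hw]
    rw [if_neg (Nat.succ_ne_zero _)]
    by_cases hm : PySem.Str.lower wk ∈ j :: rest
    · rw [if_pos hm]
      simp [hm]
    · rw [if_neg hm]
      by_cases h1 : wk ≠ "" ∧ (PySem.Str.lower wk).toList < (PySem.Str.lower st.1).toList ∧
          wk ∉ j :: rest
      · rw [if_pos h1, if_pos ⟨⟨h1.1, hm, h1.2.2⟩, h1.2.1⟩]
      · rw [if_neg h1, if_neg (fun h => h1 ⟨h.1.1, h.2, h.1.2.2⟩)]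

lemma foldl_pvStepA_fst (excl : List String) : ∀ (l : List String) (st : String × String),
    (l.foldl (pvStepA excl) st).1 = l.foldl (pvMinStep excl) st.1 := by
  intro l
  induction l with
  | nil => intro st; rfl
  | cons w l ih =>
    intro st
    simp only [List.foldl_cons]
    rw [ih (pvStepA excl st w), pvStepA_fst]

-- A's outer for-i loop is a fold over the flattened word list
lemma pvFoldl_lines (excl : List String) : ∀ (lines : List String) (st : String × String),
    lines.foldl (fun st i => (pvSplitA i).foldl (pvStepA excl) st) st
      = (lines.flatMap pvSplitA).foldl (pvStepA excl) st := by
  intro lines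
  induction lines with
  | nil => intro st; rfl
  | cons i lines ih =>
    intro st
    simp only [List.foldl_cons, List.flatMap_cons, List.foldl_append]
    exact ih _

lemma pvMinStep_eq (excl : List String) (s w : String) :
    pvMinStep excl s w = if pvCand excl w = true then pvBare s w else s := by
  by_cases h : pvCand excl w = true <;> simp [pvMinStep, pvBare, h]

-- A computes: running min of pvBare over the filtered word list, started at "zzz"
lemma smallest_word_eq (excl ind : List String) :
    smallest_word excl ind =
      (if ((pvWords ind).filter (fun w => pvCand excl w)).foldl pvBare "zzz" = "zzz"
       then "" else ((pvWords ind).filter (fun w => pvCand excl w)).foldl pvBare "zzz") := by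
  have h : (ind.foldl (fun st i => (pvSplitA i).foldl (pvStepA excl) st)
        ("zzz", "")).1
      = ((pvWords ind).filter (fun w => pvCand excl w)).foldl pvBare "zzz" := by
    rw [pvFoldl_lines, foldl_pvStepA_fst, List.foldl_filter]
    unfold pvWords
    have e : pvMinStep excl = fun a b => if pvCand excl b = true then pvBare a b else a :=
      funext fun a => funext fun b => pvMinStep_eq excl a b
    rw [e]
  simp only [smallest_word]
  rw [h]

-- B's filter predicate is (the decidable form of) pvCand
lemma pvCandB_eq (excl : List String) (w : String) :
    ((w ≠ "" && !(PySem.Set.contains (PySem.Set.ofList excl) (PySem.Str.lower w))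
        && !(PySem.Set.contains (PySem.Set.ofList excl) w)) : Bool)
      = pvCand excl w := by
  rw [Bool.eq_iff_iff]
  simp [pvCand, pysem, and_assoc]

-- B computes: head of the stable sort (by lowercase key) of the same filtered word list
lemma smallest_word_alt_eq (excl ind : List String) :
    smallest_word_alt excl ind =
      (match PySem.List.sorted ((pvWords ind).filter (fun w => pvCand excl w))
          (fun w => pvKey w) false with
       | [] => ""
       | x :: _ => x) := by
  have hf : (ind.flatMap (fun line => (pvSplitA line).filter (fun w =>
        w ≠ "" && !(PySem.Set.contains (PySem.Set.ofList excl) (PySem.Str.lower w))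
          && !(PySem.Set.contains (PySem.Set.ofList excl) w))))
      = (pvWords ind).filter (fun w => pvCand excl w) := by
    simp only [pvCandB_eq]
    unfold pvWords
    exact (List.filter_flatMap ..).symm
  simp only [smallest_word_alt]
  rw [hf]
  rfl

-- running min: stays put when nothing beats the start
lemma foldl_pvBare_fix : ∀ (l : List String) (a : String),
    (∀ y ∈ l, ¬ pvKey y < pvKey a) → l.foldl pvBare a = a := by
  intro l
  induction l with
  | nil => intro a _; rfl
  | cons y l ih =>
    intro a h
    simp only [List.foldl_cons]
    rw [show pvBare a y = a from by simp [pvBare, h y (by simp)]]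
    exact ih a fun z hz => h z (by simp [hz])

-- running min: the result's key is minimal
lemma foldl_pvBare_min : ∀ (l : List String) (a : String),
    pvKey (l.foldl pvBare a) ≤ pvKey a ∧ ∀ y ∈ l, pvKey (l.foldl pvBare a) ≤ pvKey y := by
  intro l
  induction l with
  | nil => intro a; exact ⟨le_refl _, by simp⟩
  | cons y l ih =>
    intro a
    simp only [List.foldl_cons]
    obtain ⟨h1, h2⟩ := ih (pvBare a y)
    have hb : pvKey (pvBare a y) ≤ pvKey a ∧ pvKey (pvBare a y) ≤ pvKey y := by
      unfold pvBare; split_ifs with h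
      · exact ⟨le_of_lt h, le_refl _⟩
      · exact ⟨le_refl _, not_lt.mp h⟩
    refine ⟨le_trans h1 hb.1, ?_⟩
    intro z hz
    rcases List.mem_cons.mp hz with rfl | hz'
    · exact le_trans h1 hb.2
    · exact h2 z hz'

-- running min: a start that the list's own min beats can be replaced by the first element
lemma foldl_pvBare_skip : ∀ (l : List String) (c a : String),
    pvKey (l.foldl pvBare c) < pvKey a → (c :: l).foldl pvBare a = l.foldl pvBare c := by
  intro l
  induction l with
  | nil =>
    intro c a h
    simp only [List.foldl_cons, List.foldl_nil] at h ⊢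
    simp [pvBare, h]
  | cons y l ih =>
    intro c a h
    simp only [List.foldl_cons] at h ⊢
    by_cases hc : pvKey c < pvKey a
    · rw [show pvBare a c = c from by simp [pvBare, hc]]
    · rw [show pvBare a c = a from by simp [pvBare, hc]]
      by_cases hy : pvKey y < pvKey a
      · have hyc : pvKey y < pvKey c := lt_of_lt_of_le hy (not_lt.mp hc)
        rw [show pvBare a y = y from by simp [pvBare, hy],
            show pvBare c y = y from by simp [pvBare, hyc]]
      · rw [show pvBare a y = a from by simp [pvBare, hy]]
        have hstep := ih (pvBare c y) a h
        simp only [List.foldl_cons] at hstep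
        have hba : pvBare a (pvBare c y) = a := by
          by_cases hd : pvKey y < pvKey c <;> simp [pvBare, hd, hc, hy]
        rw [hba] at hstep
        exact hstep

-- running min: the result is the start or a list element
lemma foldl_pvBare_mem : ∀ (l : List String) (a : String), l.foldl pvBare a ∈ a :: l := by
  intro l
  induction l with
  | nil => intro a; simp
  | cons y l ih =>
    intro a
    simp only [List.foldl_cons]
    have := ih (pvBare a y)
    rcases List.mem_cons.mp this with h | h
    · rw [h]; unfold pvBare; split_ifs <;> simp
    · simp [h]

-- head of the stable insertion sort = the running min (first minimal element)
lemma pvFoldl_insert_head : ∀ (t : List String) (m : String) (rest : List String),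
    ∃ r', t.foldl (fun acc x =>
        PySem.List.insertBy (fun a b => decide (pvKey a < pvKey b)) x acc) (m :: rest)
      = (t.foldl pvBare m) :: r' := by
  intro t
  induction t with
  | nil => exact fun m rest => ⟨rest, rfl⟩
  | cons x t ih =>
    intro m rest
    simp only [List.foldl_cons]
    by_cases h : pvKey x < pvKey m
    · rw [show PySem.List.insertBy (fun a b => decide (pvKey a < pvKey b)) x (m :: rest)
          = if decide (pvKey x < pvKey m) then x :: m :: rest
            else m :: PySem.List.insertBy (fun a b => decide (pvKey a < pvKey b)) x rest from rfl]
      rw [if_pos (by simpa using h), show pvBare m x = x from by simp [pvBare, h]]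
      exact ih x (m :: rest)
    · rw [show PySem.List.insertBy (fun a b => decide (pvKey a < pvKey b)) x (m :: rest)
          = if decide (pvKey x < pvKey m) then x :: m :: rest
            else m :: PySem.List.insertBy (fun a b => decide (pvKey a < pvKey b)) x rest from rfl]
      rw [if_neg (by simpa using h), show pvBare m x = m from by simp [pvBare, h]]
      exact ih m _

-- ===== VERDICT =====
theorem smallest_word_spec : Claim_unchanged_smallest_word := by
  intro excl ind _
  unfold Spec_smallest_word
  intro hnD
  rw [pvD_iff] at hnD
  rw [smallest_word_eq, smallest_word_alt_eq]
  cases hfc : (pvWords ind).filter (fun w => pvCand excl w) with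
  | nil => rfl
  | cons c cs =>
    rw [hfc] at hnD
    have hnall : ¬ ∀ w ∈ c :: cs, ¬ (PySem.Str.lower w).toList < "zzz".toList :=
      fun h => hnD ⟨List.cons_ne_nil c cs, h⟩
    push Not at hnall
    obtain ⟨w, hwfc, hlt⟩ := hnall
    have hmin := foldl_pvBare_min cs c
    have hkm : pvKey (cs.foldl pvBare c) < pvKey "zzz" := by
      have hle : pvKey (cs.foldl pvBare c) ≤ pvKey w := by
        rcases List.mem_cons.mp hwfc with rfl | h'
        · exact hmin.1
        · exact hmin.2 w h'
      rw [pvKey_zzz]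
      exact lt_of_le_of_lt hle hlt
    have hA : (c :: cs).foldl pvBare "zzz" = cs.foldl pvBare c :=
      foldl_pvBare_skip cs c "zzz" hkm
    have hne : cs.foldl pvBare c ≠ "zzz" := by
      intro e
      rw [e] at hkm
      exact lt_irrefl _ hkm
    obtain ⟨r', hr⟩ := pvFoldl_insert_head cs c []
    rw [hA, if_neg hne, PySem.List.sorted_eq_foldl_insertBy]
    simp only [List.foldl_cons]
    rw [show PySem.List.insertBy (fun a b => decide (pvKey a < pvKey b)) c [] = [c] from rfl, hr]

theorem smallest_word_changed : Claim_changed_smallest_word := by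
  unfold Claim_changed_smallest_word; decide

theorem smallest_word_tight : Claim_exact_smallest_word := by
  intro excl ind _ hD
  rw [pvD_iff] at hD
  obtain ⟨hne0, hall⟩ := hD
  rw [smallest_word_eq, smallest_word_alt_eq]
  cases hfc : (pvWords ind).filter (fun w => pvCand excl w) with
  | nil => exact absurd hfc hne0
  | cons c cs =>
    rw [hfc] at hall
    have hA : (c :: cs).foldl pvBare "zzz" = "zzz" := by
      apply foldl_pvBare_fix
      intro y hy
      rw [pvKey_zzz]
      exact hall y hy
    obtain ⟨r', hr⟩ := pvFoldl_insert_head cs c []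
    rw [hA, if_pos rfl, PySem.List.sorted_eq_foldl_insertBy]
    simp only [List.foldl_cons]
    rw [show PySem.List.insertBy (fun a b => decide (pvKey a < pvKey b)) c [] = [c] from rfl, hr]
    have hmne : cs.foldl pvBare c ≠ "" := by
      have hm := foldl_pvBare_mem cs c
      have : cs.foldl pvBare c ∈ (pvWords ind).filter (fun w => pvCand excl w) := by
        rw [hfc]; exact hm
      exact ((pvCand_iff excl _).mp (List.mem_filter.mp this).2).1
    exact fun e => hmne e.symm
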